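-- pv_equiv track=rewrite | github.com/domalouf/ML-Final-Project | Perceptron/perceptron.py | combine_matrix_rows_with_list
-- ===== SOURCE A (Python) =====
-- def combine_matrix_rows_with_list(matrix, x):
--     combined_list = []
--     for i, row in enumerate(matrix):
--         if i < len(x):
--             combined_list.append((row, x[i]))
--         else:
--             combined_list.append((row, None))  # If there are not enough elements in x, use None for the missing value.
--     return combined_list
-- ===== SOURCE B (Python) =====
-- def combine_matrix_rows_with_list(matrix, x):
--     # zip the overlapping prefix, then pad the leftover rows with None
--     return [(row, xi) for row, xi in zip(matrix, x)] + [(row, None) for row in matrix[len(x):]]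
-- ===== Notes on version B (the rewrite author's own statement) =====
-- stated objective: idiomatic
-- what changed: Replaces the indexed loop with a length-comparison branch by a zip over the common prefix followed by None-padding of the leftover rows (matrix[len(x):]), removing the index and branch entirely.
import Mathlib
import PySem

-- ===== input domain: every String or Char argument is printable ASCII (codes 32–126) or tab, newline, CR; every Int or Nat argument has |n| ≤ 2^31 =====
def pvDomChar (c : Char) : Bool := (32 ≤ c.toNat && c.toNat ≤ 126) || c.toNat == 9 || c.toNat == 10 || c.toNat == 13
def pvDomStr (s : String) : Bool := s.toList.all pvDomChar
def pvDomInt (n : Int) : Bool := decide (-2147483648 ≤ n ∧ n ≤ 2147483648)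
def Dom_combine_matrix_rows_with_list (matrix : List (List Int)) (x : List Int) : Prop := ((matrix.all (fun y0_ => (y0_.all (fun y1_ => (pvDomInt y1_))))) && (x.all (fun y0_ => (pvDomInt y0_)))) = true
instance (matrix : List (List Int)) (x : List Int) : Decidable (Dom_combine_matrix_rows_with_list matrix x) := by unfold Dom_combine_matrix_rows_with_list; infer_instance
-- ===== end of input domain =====

-- B pads with a zip over the common prefix plus None-padding of the leftover rows (idiomatic; no index, no branch).

-- ===== PORT A =====
-- the 'for i, row in enumerate(matrix)' loop as structural recursion carrying the index i
def pvALoop_combine (x : List Int) : Int → List (List Int) → List (List Int × Option Int)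
  | _, [] => []
  | i, row :: rest =>
    (if i < (x.length : Int) then (row, PySem.List.pyGet? x i) else (row, none))
      :: pvALoop_combine x (i + 1) rest

def combine_matrix_rows_with_list (matrix : List (List Int)) (x : List Int) : List (List Int × Option Int) :=
  pvALoop_combine x 0 matrix

-- ===== PORT B =====
def combine_matrix_rows_with_list_alt (matrix : List (List Int)) (x : List Int) : List (List Int × Option Int) :=
  ((matrix.zip x).map (fun p => (p.1, some p.2)))
    ++ ((matrix.drop x.length).map (fun row => (row, (none : Option Int))))

-- ===== PRECONDITION & SPEC =====
def Spec_combine_matrix_rows_with_list (matrix : List (List Int)) (x : List Int) (out : List (List Int × Option Int)) : Prop := out = combine_matrix_rows_with_list_alt matrix x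
instance (matrix : List (List Int)) (x : List Int) (out : List (List Int × Option Int)) : Decidable (Spec_combine_matrix_rows_with_list matrix x out) := by unfold Spec_combine_matrix_rows_with_list; infer_instance

-- ===== CLAIM (what is proved, stated in full; the proofs are below) =====
def Claim_equal_combine_matrix_rows_with_list : Prop := ∀ (matrix : List (List Int)) (x : List Int), Dom_combine_matrix_rows_with_list matrix x → Spec_combine_matrix_rows_with_list matrix x (combine_matrix_rows_with_list matrix x)

-- ===== LEMMAS AND PROOFS =====
theorem pvALoop_nil (rows : List (List Int)) (i : Int) :
    pvALoop_combine [] i rows = rows.map (fun row => (row, (none : Option Int))) := by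
  induction rows generalizing i with
  | nil => rfl
  | cons r rs ih =>
    simp only [pvALoop_combine, ih]
    simp [PySem.List.pyGet?, PySem.List.pyIdx?]

theorem pvALoop_shift (rows : List (List Int)) (v : Int) (vs : List Int) (i : Int) (h : 0 ≤ i) :
    pvALoop_combine (v :: vs) (i + 1) rows = pvALoop_combine vs i rows := by
  induction rows generalizing i with
  | nil => rfl
  | cons r rs ih =>
    simp only [pvALoop_combine]
    rw [show PySem.List.pyGet? (v :: vs) (i + 1) = PySem.List.pyGet? vs i by
          simp only [PySem.List.pyGet?, PySem.List.pyIdx?, List.length_cons]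
          split_ifs <;>
            first
            | omega
            | rfl
            | (have hh : (i + 1).toNat = i.toNat + 1 := by omega
               simp [hh]),
        ih (i + 1) (by omega)]
    simp only [List.length_cons]
    congr 1
    push_cast
    by_cases hc : i < (vs.length : Int)
    · rw [if_pos (by omega), if_pos hc]
    · rw [if_neg (by omega), if_neg hc]

theorem pvMain (matrix : List (List Int)) (x : List Int) :
    pvALoop_combine x 0 matrix = combine_matrix_rows_with_list_alt matrix x := by
  induction matrix generalizing x with
  | nil => simp [pvALoop_combine, combine_matrix_rows_with_list_alt]
  | cons r rs ih =>
    cases x with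
    | nil =>
      simp [combine_matrix_rows_with_list_alt, pvALoop_nil, pvALoop_combine]
    | cons v vs =>
      simp only [pvALoop_combine]
      rw [show (0 : Int) + 1 = (0 : Int) + 1 from rfl, pvALoop_shift rs v vs 0 (by omega), ih vs]
      simp [combine_matrix_rows_with_list_alt, PySem.List.pyGet?, PySem.List.pyIdx?]

-- ===== VERDICT (by name: the statement is the Claim_ definition above) =====
theorem combine_matrix_rows_with_list_spec : Claim_equal_combine_matrix_rows_with_list := by
  intro matrix x _
  unfold Spec_combine_matrix_rows_with_list combine_matrix_rows_with_list
  exact pvMain matrix x
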